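-- pv_equiv track=rewrite | github.com/LoT-Yang-Lab/Minecraft_task | experiments/navigation6/agents/nav6_env_adapter.py | build_transition_graph_from_map_data
-- ===== SOURCE A (Python) =====
-- from typing import Dict, List, Optional, Set, Tuple
--
-- GridPos = Tuple[int, int]
--
-- def build_transition_graph_from_map_data(map_data: dict, cell_to_code: Dict[GridPos, int]) -> Dict[int, Set[int]]:
--     graph: Dict[int, Set[int]] = {code: set() for code in cell_to_code.values()}
--
--     def add_edge(a: GridPos, b: GridPos) -> None:
--         if a in cell_to_code and b in cell_to_code:
--             graph[cell_to_code[a]].add(cell_to_code[b])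
--
--     loop = True
--     all_lines: List[dict] = []
--     for key in ("bus_lines", "metro_lines", "light_rail_lines", "subway_lines"):
--         all_lines.extend(map_data.get(key, []) or [])
--
--     for line in all_lines:
--         path = [tuple(p) for p in line.get("path", [])]
--         if not path:
--             continue
--         stations = set(tuple(s) for s in line.get("stations", []))
--         station_indices = [i for i, pos in enumerate(path) if pos in stations]
--         if 0 not in station_indices:
--             station_indices.insert(0, 0)
--         if (len(path) - 1) not in station_indices:
--             station_indices.append(len(path) - 1)
--         station_indices = sorted(set(station_indices))
--         if not station_indices:
--             continue
--         for j, idx in enumerate(station_indices):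
--             nxt = j + 1
--             if nxt >= len(station_indices):
--                 if not loop:
--                     continue
--                 nxt = 0
--             add_edge(path[idx], path[station_indices[nxt]])
--     return graph
-- ===== SOURCE B (Python) =====
-- from typing import Dict, List, Optional, Set, Tuple
--
-- GridPos = Tuple[int, int]
--
-- def build_transition_graph_from_map_data(map_data: dict, cell_to_code: Dict[GridPos, int]) -> Dict[int, Set[int]]:
--     graph: Dict[int, Set[int]] = {code: set() for code in cell_to_code.values()}
--
--     lines: List[dict] = []
--     for key in ("bus_lines", "metro_lines", "light_rail_lines", "subway_lines"):
--         lines += map_data.get(key) or []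
--
--     for line in lines:
--         path = [tuple(p) for p in line.get("path", [])]
--         n = len(path)
--         if n == 0:
--             continue
--         stations = set(tuple(s) for s in line.get("stations", []))
--         # single pass: emit an edge each time a key cell (endpoint or station)
--         # is reached, from the previously seen key cell
--         prev = 0
--         for i in range(1, n):
--             if i == n - 1 or path[i] in stations:
--                 a = cell_to_code.get(path[prev])
--                 b = cell_to_code.get(path[i])
--                 if a is not None and b is not None:
--                     graph[a].add(b)
--                 prev = i
--         # wrap-around edge closing the loop back to the start of the path
--         a = cell_to_code.get(path[prev])
--         b = cell_to_code.get(path[0])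
--         if a is not None and b is not None:
--             graph[a].add(b)
--     return graph
-- ===== Notes on version B (the rewrite author's own statement) =====
-- stated objective: simpler
-- what changed: Replaces the per-line index-list pipeline (enumerate-filter to collect station indices, insert 0, append len-1, sorted(set(...)), then a second indexing loop over consecutive index pairs) with one stateful pass over the path that emits an edge each time a key cell (endpoint or station) is reached from the previously seen key cell, plus one wrap-around edge.
import Mathlib
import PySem

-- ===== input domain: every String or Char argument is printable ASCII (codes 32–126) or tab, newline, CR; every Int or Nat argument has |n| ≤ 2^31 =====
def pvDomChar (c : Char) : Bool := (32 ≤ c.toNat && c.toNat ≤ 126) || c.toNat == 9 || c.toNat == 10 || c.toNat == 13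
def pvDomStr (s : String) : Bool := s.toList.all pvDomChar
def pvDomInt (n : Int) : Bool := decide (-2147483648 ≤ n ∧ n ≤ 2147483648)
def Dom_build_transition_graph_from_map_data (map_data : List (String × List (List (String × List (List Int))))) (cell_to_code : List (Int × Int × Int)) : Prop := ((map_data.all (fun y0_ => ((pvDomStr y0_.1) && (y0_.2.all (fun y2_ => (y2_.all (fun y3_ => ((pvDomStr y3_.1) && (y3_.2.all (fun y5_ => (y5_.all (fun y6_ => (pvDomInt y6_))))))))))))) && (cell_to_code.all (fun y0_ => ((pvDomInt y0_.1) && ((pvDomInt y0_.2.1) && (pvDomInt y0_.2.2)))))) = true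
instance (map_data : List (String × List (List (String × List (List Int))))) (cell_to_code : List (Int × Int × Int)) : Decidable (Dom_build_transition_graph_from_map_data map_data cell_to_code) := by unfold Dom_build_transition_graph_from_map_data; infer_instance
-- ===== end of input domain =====

-- B replaces A's per-line index-list pipeline (collect station indices, insert the
-- endpoints, sorted(set(...)), then pair consecutive indices) with a single stateful
-- pass over the path emitting an edge at each key cell, for a simpler per-line scan.

-- ===== PORT A =====
-- shared parameter decoding: a Python tuple used as a grid position matches a
-- (Int × Int) key of cell_to_code exactly when it has two components
def pvPairOf (l : List Int) : Option (Int × Int) :=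
  match l with
  | [x, y] => some (x, y)
  | _ => none

def pvCtc (cell_to_code : List (Int × Int × Int)) : PySem.Dict (Int × Int) Int :=
  PySem.Dict.ofList (cell_to_code.map (fun t => ((t.1, t.2.1), t.2.2)))

-- A's local constant 'loop = True'
def pvLoopA : Bool := true

-- A's helper add_edge (graph[cell_to_code[a]] always has its key, so modify is exact)
def pvAddEdgeA (c : PySem.Dict (Int × Int) Int) (g : PySem.Dict Int (PySem.Set Int))
    (a b : List Int) : PySem.Dict Int (PySem.Set Int) :=
  if (match pvPairOf a with | some k => c.contains k | none => false)
      && (match pvPairOf b with | some k => c.contains k | none => false) then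
    PySem.Dict.modify g (c.getD ((pvPairOf a).getD (0, 0)) 0) PySem.Set.empty
      (fun s => PySem.Set.add s (c.getD ((pvPairOf b).getD (0, 0)) 0))
  else g

-- A's per-line loop body
def pvLineA (c : PySem.Dict (Int × Int) Int) (g : PySem.Dict Int (PySem.Set Int))
    (line : List (String × List (List Int))) : PySem.Dict Int (PySem.Set Int) :=
  let path := (PySem.Dict.ofList line).getD "path" []
  if path = [] then g
  else
    let stations : PySem.Set (List Int) := PySem.Set.ofList ((PySem.Dict.ofList line).getD "stations" [])
    let si0 := ((PySem.List.enumerate path).filter (fun p => stations.contains p.2)).map (fun p => p.1)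
    let si1 := if si0.contains 0 = false then 0 :: si0 else si0
    let si2 := if si1.contains ((path.length : Int) - 1) = false then si1 ++ [(path.length : Int) - 1] else si1
    let si := PySem.List.sorted (PySem.Set.ofList si2) (fun x => x)
    if si = [] then g
    else
      (PySem.List.enumerate si).foldl (fun g p =>
        if p.1 + 1 ≥ (si.length : Int) then
          if pvLoopA = false then g
          else pvAddEdgeA c g (PySem.List.pyGetD path p.2 [])
            (PySem.List.pyGetD path (PySem.List.pyGetD si 0 0) [])
        else pvAddEdgeA c g (PySem.List.pyGetD path p.2 [])
          (PySem.List.pyGetD path (PySem.List.pyGetD si (p.1 + 1) 0) [])) g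

def build_transition_graph_from_map_data (map_data : List (String × List (List (String × List (List Int))))) (cell_to_code : List (Int × Int × Int)) : List (Int × List Int) :=
  let c := pvCtc cell_to_code
  let graph0 : PySem.Dict Int (PySem.Set Int) :=
    c.values.foldl (fun g code => g.insert code PySem.Set.empty) PySem.Dict.empty
  let all_lines := ["bus_lines", "metro_lines", "light_rail_lines", "subway_lines"].foldl
    (fun acc key => acc ++ (PySem.Dict.ofList map_data).getD key []) []
  (all_lines.foldl (pvLineA c) graph0).items

-- ===== PORT B =====
-- cell_to_code.get(pos)
def pvCodeOfB (c : PySem.Dict (Int × Int) Int) (pos : List Int) : Option Int :=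
  match pvPairOf pos with
  | some k => c.get? k
  | none => none

-- B's inline edge insertion: both codes present -> graph[a].add(b)
def pvAddEdgeB (c : PySem.Dict (Int × Int) Int) (g : PySem.Dict Int (PySem.Set Int))
    (a b : List Int) : PySem.Dict Int (PySem.Set Int) :=
  match pvCodeOfB c a, pvCodeOfB c b with
  | some ca, some cb => PySem.Dict.modify g ca PySem.Set.empty (fun s => PySem.Set.add s cb)
  | _, _ => g

-- B's per-line single pass: state (graph, prev key index), then the wrap-around edge
def pvLineB (c : PySem.Dict (Int × Int) Int) (g : PySem.Dict Int (PySem.Set Int))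
    (line : List (String × List (List Int))) : PySem.Dict Int (PySem.Set Int) :=
  let path := (PySem.Dict.ofList line).getD "path" []
  let n : Int := (path.length : Int)
  if n = 0 then g
  else
    let stations : PySem.Set (List Int) := PySem.Set.ofList ((PySem.Dict.ofList line).getD "stations" [])
    let r := (PySem.List.pyRange 1 n).foldl (fun (st : PySem.Dict Int (PySem.Set Int) × Int) i =>
      if (i == n - 1) || stations.contains (PySem.List.pyGetD path i []) then
        (pvAddEdgeB c st.1 (PySem.List.pyGetD path st.2 []) (PySem.List.pyGetD path i []), i)
      else st) (g, 0)
    pvAddEdgeB c r.1 (PySem.List.pyGetD path r.2 []) (PySem.List.pyGetD path 0 [])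

def build_transition_graph_from_map_data_alt (map_data : List (String × List (List (String × List (List Int))))) (cell_to_code : List (Int × Int × Int)) : List (Int × List Int) :=
  let c := pvCtc cell_to_code
  let graph0 : PySem.Dict Int (PySem.Set Int) :=
    c.values.foldl (fun g code => g.insert code PySem.Set.empty) PySem.Dict.empty
  let lines := ["bus_lines", "metro_lines", "light_rail_lines", "subway_lines"].foldl
    (fun acc key => acc ++ (PySem.Dict.ofList map_data).getD key []) []
  (lines.foldl (pvLineB c) graph0).items

-- ===== PRECONDITION & SPEC =====
def Spec_build_transition_graph_from_map_data (map_data : List (String × List (List (String × List (List Int))))) (cell_to_code : List (Int × Int × Int)) (out : List (Int × List Int)) : Prop := out = build_transition_graph_from_map_data_alt map_data cell_to_code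
instance (map_data : List (String × List (List (String × List (List Int))))) (cell_to_code : List (Int × Int × Int)) (out : List (Int × List Int)) : Decidable (Spec_build_transition_graph_from_map_data map_data cell_to_code out) := by unfold Spec_build_transition_graph_from_map_data; infer_instance

-- ===== CLAIM (what is proved, stated in full; the proofs are below) =====
def Claim_equal_build_transition_graph_from_map_data : Prop := ∀ (map_data : List (String × List (List (String × List (List Int))))) (cell_to_code : List (Int × Int × Int)), Dom_build_transition_graph_from_map_data map_data cell_to_code → Spec_build_transition_graph_from_map_data map_data cell_to_code (build_transition_graph_from_map_data map_data cell_to_code)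

-- ===== LEMMAS AND PROOFS =====

-- edge keyed by a pair of path indices (canonical form both per-line loops reduce to)
def pvEdge (c : PySem.Dict (Int × Int) Int) (path : List (List Int))
    (g : PySem.Dict Int (PySem.Set Int)) (p : Int × Int) : PySem.Dict Int (PySem.Set Int) :=
  pvAddEdgeA c g (PySem.List.pyGetD path p.1 []) (PySem.List.pyGetD path p.2 [])

-- the canonical value of one line's processing, for a nonempty path
def pvCanon (c : PySem.Dict (Int × Int) Int) (path : List (List Int))
    (stations : PySem.Set (List Int)) (g : PySem.Dict Int (PySem.Set Int)) : PySem.Dict Int (PySem.Set Int) :=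
  let m := (PySem.List.pyRange 1 (path.length : Int)).filter
    (fun i => (i == (path.length : Int) - 1) || stations.contains (PySem.List.pyGetD path i []))
  pvEdge c path (((0 :: m).zip m).foldl (pvEdge c path) g) ((0 :: m).getLast?.getD 0, 0)

theorem pvAddEdge_eq (c : PySem.Dict (Int × Int) Int) (g : PySem.Dict Int (PySem.Set Int))
    (a b : List Int) : pvAddEdgeA c g a b = pvAddEdgeB c g a b := by
  unfold pvAddEdgeA pvAddEdgeB pvCodeOfB
  cases ha : pvPairOf a with
  | none => cases hb : pvPairOf b <;> simp
  | some ka =>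
    cases hb : pvPairOf b with
    | none => simp
    | some kb =>
      cases hga : c.get? ka <;> cases hgb : c.get? kb <;>
        simp [PySem.Dict.contains_eq_isSome_get?, hga, hgb, PySem.Dict.getD_eq_get?_getD]

theorem pvAloop (c : PySem.Dict (Int × Int) Int) (path : List (List Int)) (ys : List Int) :
    ∀ (suf : List Int) (k : Nat) (g : PySem.Dict Int (PySem.Set Int)),
    ys.drop k = suf → suf ≠ [] →
    (PySem.List.enumerate suf (k : Int)).foldl (fun g p =>
        if p.1 + 1 ≥ (ys.length : Int) then
          if pvLoopA = false then g
          else pvAddEdgeA c g (PySem.List.pyGetD path p.2 [])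
            (PySem.List.pyGetD path (PySem.List.pyGetD ys 0 0) [])
        else pvAddEdgeA c g (PySem.List.pyGetD path p.2 [])
          (PySem.List.pyGetD path (PySem.List.pyGetD ys (p.1 + 1) 0) [])) g
    = pvEdge c path ((suf.zip suf.tail).foldl (pvEdge c path) g)
        (suf.getLast?.getD 0, PySem.List.pyGetD ys 0 0) := by
  intro suf
  induction suf with
  | nil => intro k g _ h; exact absurd rfl h
  | cons a l ih =>
    intro k g hdrop _
    have h1 := congrArg List.length hdrop
    rw [List.length_drop] at h1
    have h2 : k ≤ ys.length := by
      by_contra hk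
      rw [List.drop_eq_nil_of_le (by omega)] at hdrop
      exact (List.cons_ne_nil a l) hdrop.symm
    cases l with
    | nil =>
      have hlen : ys.length = k + 1 := by simp at h1; omega
      have hc : ((k : Int) + 1 ≥ ((ys.length : Nat) : Int)) := by
        rw [hlen]; push_cast; omega
      simp [PySem.List.enumerate_cons, PySem.List.enumerate_nil, hc, pvLoopA, pvEdge]
    | cons b rest =>
      have hlen : k + 2 ≤ ys.length := by simp at h1; omega
      have hc : ¬ ((k : Int) + 1 ≥ ((ys.length : Nat) : Int)) := by
        omega
      have hdropb : ys.drop (k + 1) = b :: rest := by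
        have hdd : ys.drop (k + 1) = (ys.drop k).drop 1 := by rw [List.drop_drop]
        rw [hdd, hdrop]; rfl
      have hb : PySem.List.pyGetD ys ((k : Int) + 1) 0 = b := by
        have hcast : ((k : Int) + 1) = ((k + 1 : Nat) : Int) := by push_cast; ring
        rw [hcast, PySem.List.pyGetD_natCast]
        have hg : ys[k + 1]? = some b := by
          have hge := List.getElem?_drop (xs := ys) (i := k + 1) (j := 0)
          simp [hdropb] at hge
          simpa using hge.symm
        simp [List.getD, hg]
      rw [PySem.List.enumerate_cons, List.foldl_cons]
      dsimp only
      rw [if_neg hc, hb]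
      have hcast : ((k : Int) + 1) = ((k + 1 : Nat) : Int) := by push_cast; ring
      rw [hcast, ih (k + 1) _ hdropb (List.cons_ne_nil b rest)]
      simp [pvEdge, List.getLast?_cons_cons]

theorem pvBscan (c : PySem.Dict (Int × Int) Int) (path : List (List Int))
    (stations : PySem.Set (List Int)) (n : Int) :
    ∀ (l : List Int) (p : Int) (g : PySem.Dict Int (PySem.Set Int)),
    l.foldl (fun (st : PySem.Dict Int (PySem.Set Int) × Int) i =>
      if (i == n - 1) || stations.contains (PySem.List.pyGetD path i []) then
        (pvAddEdgeB c st.1 (PySem.List.pyGetD path st.2 []) (PySem.List.pyGetD path i []), i)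
      else st) (g, p)
    = (((p :: l.filter (fun i => (i == n - 1) || stations.contains (PySem.List.pyGetD path i []))).zip
          (l.filter (fun i => (i == n - 1) || stations.contains (PySem.List.pyGetD path i [])))).foldl
        (pvEdge c path) g,
       (p :: l.filter (fun i => (i == n - 1) || stations.contains (PySem.List.pyGetD path i []))).getLast?.getD 0) := by
  intro l
  induction l with
  | nil => intro p g; simp
  | cons i l ih =>
    intro p g
    rw [List.foldl_cons]
    by_cases hq : ((i == n - 1) || stations.contains (PySem.List.pyGetD path i [])) = true
    · rw [List.filter_cons_of_pos (l := l)
        (p := fun j => (j == n - 1) || stations.contains (PySem.List.pyGetD path j [])) hq]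
      dsimp only
      rw [if_pos hq, ih i _]
      simp [pvEdge, pvAddEdge_eq, List.getLast?_cons_cons]
    · rw [List.filter_cons_of_neg (l := l)
        (p := fun j => (j == n - 1) || stations.contains (PySem.List.pyGetD path j [])) (by simpa using hq)]
      dsimp only
      rw [if_neg hq, ih p g]

-- A's station-index pipeline produces exactly the sorted key-index list 0 :: filter
theorem pvKey_sorted (path : List (List Int)) (stations : PySem.Set (List Int)) (h : path ≠ [])
    (si0 si1 si2 : List Int)
    (h0 : si0 = ((PySem.List.enumerate path).filter (fun p => stations.contains p.2)).map (fun p => p.1))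
    (h1 : si1 = if si0.contains 0 = false then 0 :: si0 else si0)
    (h2 : si2 = if si1.contains ((path.length : Int) - 1) = false then si1 ++ [(path.length : Int) - 1] else si1) :
    PySem.List.sorted (PySem.Set.ofList si2) (fun x => x)
      = 0 :: (PySem.List.pyRange 1 (path.length : Int)).filter
          (fun i => (i == (path.length : Int) - 1) || stations.contains (PySem.List.pyGetD path i [])) := by
  have hN : (0 : Int) < (path.length : Int) := by
    cases path with
    | nil => exact absurd rfl h
    | cons x xs => simp
  have hsplit : PySem.List.pyRange 0 (path.length : Int)
      = 0 :: PySem.List.pyRange 1 (path.length : Int) := by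
    have := PySem.List.pyRange_one_cons hN
    simpa using this
  -- step 1: si0 is the filtered full range
  have h0' : si0 = (PySem.List.pyRange 0 (path.length : Int)).filter
      (fun i => stations.contains (PySem.List.pyGetD path i [])) := by
    rw [h0, PySem.List.enumerate_eq_map_pyRange path [], List.filter_map, List.map_map]
    simp [Function.comp_def, PySem.List.len]
  -- step 2: si1 always starts with 0
  have h1' : si1 = 0 :: (PySem.List.pyRange 1 (path.length : Int)).filter
      (fun i => stations.contains (PySem.List.pyGetD path i [])) := by
    have hnot0 : ∀ P : Int → Bool, (0 : Int) ∉ (PySem.List.pyRange 1 (path.length : Int)).filter P := by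
      intro P hmem
      have := (List.mem_filter.mp hmem).1
      rw [PySem.List.mem_pyRange_one] at this
      omega
    have hnot0' := hnot0 (fun i => decide (PySem.List.pyGetD path i [] ∈ stations))
    rw [h1, h0', hsplit, List.filter_cons]
    by_cases hS : PySem.List.pyGetD path 0 [] ∈ stations
    · simp [hS]
    · simp [hS, hnot0']
  -- step 3: si2 additionally carries the endpoint index
  have h2' : si2 = 0 :: (PySem.List.pyRange 1 (path.length : Int)).filter
      (fun i => (i == (path.length : Int) - 1) || stations.contains (PySem.List.pyGetD path i [])) := by
    by_cases hN1 : (path.length : Int) = 1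
    · have hr : PySem.List.pyRange 1 (path.length : Int) = [] := by
        rw [hN1]; exact PySem.List.pyRange_one_eq_nil le_rfl
      rw [h2, h1', hr, hN1]
      simp
    · have hNN : (1 : Int) ≤ (path.length : Int) - 1 := by omega
      have hsp : PySem.List.pyRange 1 (path.length : Int)
          = PySem.List.pyRange 1 ((path.length : Int) - 1) ++ [(path.length : Int) - 1] := by
        have hrw : (path.length : Int) - 1 + 1 = (path.length : Int) := by ring
        have hx := PySem.List.pyRange_one_succ_right hNN
        rw [hrw] at hx
        exact hx
      have hcongr : ∀ S' : List Int → Bool,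
          (PySem.List.pyRange 1 ((path.length : Int) - 1)).filter
              (fun i => (i == (path.length : Int) - 1) || S' (PySem.List.pyGetD path i []))
          = (PySem.List.pyRange 1 ((path.length : Int) - 1)).filter
              (fun i => S' (PySem.List.pyGetD path i [])) := by
        intro S'
        apply List.filter_congr
        intro x hx
        rw [PySem.List.mem_pyRange_one] at hx
        have hne : (x == (path.length : Int) - 1) = false := by
          simp only [beq_eq_false_iff_ne, ne_eq]
          omega
        rw [hne, Bool.false_or]
      have hq1 : (((path.length : Int) - 1) == (path.length : Int) - 1) = true := by simp
      rw [h2, h1', hsp, List.filter_append, List.filter_append]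
      simp only [List.filter_cons, List.filter_nil, hq1, Bool.true_or]
      by_cases hS1 : stations.contains (PySem.List.pyGetD path ((path.length : Int) - 1) []) = true
      · rw [hS1]
        simp only [hcongr]
        simp
      · rw [Bool.not_eq_true] at hS1
        rw [hS1]
        simp only [hcongr]
        simp
        omega
  -- step 4: si2 is strictly sorted and duplicate-free, so sorted(set(si2)) is itself
  rw [h2']
  have hpair : List.Pairwise (· < ·) (0 :: (PySem.List.pyRange 1 (path.length : Int)).filter
      (fun i => (i == (path.length : Int) - 1) || stations.contains (PySem.List.pyGetD path i []))) := by
    rw [List.pairwise_cons]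
    constructor
    · intro x hx
      have := (List.mem_filter.mp hx).1
      rw [PySem.List.mem_pyRange_one] at this
      omega
    · exact List.Pairwise.sublist List.filter_sublist (PySem.List.pairwise_lt_pyRange_one 1 _)
  have hnd : List.Nodup (0 :: (PySem.List.pyRange 1 (path.length : Int)).filter
      (fun i => (i == (path.length : Int) - 1) || stations.contains (PySem.List.pyGetD path i []))) :=
    hpair.imp (fun hab => ne_of_lt hab)
  rw [PySem.Set.ofList_eq_self_of_nodup _ hnd]
  exact PySem.List.sorted_eq_of_perm_of_pairwise_lt _ _ _ (List.Perm.refl _) hpair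

-- pvAloop specialised to the whole list (Python's enumerate starts at 0)
theorem pvAfold (c : PySem.Dict (Int × Int) Int) (path : List (List Int)) (K : List Int)
    (hne : K ≠ []) (g : PySem.Dict Int (PySem.Set Int)) :
    (PySem.List.enumerate K).foldl (fun g p =>
        if p.1 + 1 ≥ (K.length : Int) then
          if pvLoopA = false then g
          else pvAddEdgeA c g (PySem.List.pyGetD path p.2 [])
            (PySem.List.pyGetD path (PySem.List.pyGetD K 0 0) [])
        else pvAddEdgeA c g (PySem.List.pyGetD path p.2 [])
          (PySem.List.pyGetD path (PySem.List.pyGetD K (p.1 + 1) 0) [])) g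
    = pvEdge c path ((K.zip K.tail).foldl (pvEdge c path) g)
        (K.getLast?.getD 0, PySem.List.pyGetD K 0 0) := by
  have hl := pvAloop c path K K 0 g rfl hne
  simp only [Nat.cast_zero] at hl
  exact hl

theorem pvLineA_canon (c : PySem.Dict (Int × Int) Int) (g : PySem.Dict Int (PySem.Set Int))
    (line : List (String × List (List Int)))
    (h : (PySem.Dict.ofList line).getD "path" ([] : List (List Int)) ≠ []) :
    pvLineA c g line = pvCanon c ((PySem.Dict.ofList line).getD "path" [])
      (PySem.Set.ofList ((PySem.Dict.ofList line).getD "stations" [])) g := by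
  simp only [pvLineA]
  rw [if_neg h]
  rw [pvKey_sorted _ _ h _ _ _ rfl rfl rfl]
  rw [if_neg (List.cons_ne_nil _ _)]
  rw [pvAfold c _ _ (List.cons_ne_nil _ _) g]
  simp [pvCanon, pvEdge, PySem.List.pyGetD_zero_cons]

theorem pvLineB_canon (c : PySem.Dict (Int × Int) Int) (g : PySem.Dict Int (PySem.Set Int))
    (line : List (String × List (List Int)))
    (h : (PySem.Dict.ofList line).getD "path" ([] : List (List Int)) ≠ []) :
    pvLineB c g line = pvCanon c ((PySem.Dict.ofList line).getD "path" [])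
      (PySem.Set.ofList ((PySem.Dict.ofList line).getD "stations" [])) g := by
  have hn : ¬ ((((PySem.Dict.ofList line).getD "path" ([] : List (List Int))).length : Int) = 0) := by
    simpa using h
  simp only [pvLineB]
  rw [if_neg hn, pvBscan]
  simp [pvCanon, pvEdge, pvAddEdge_eq]

theorem pvLine_eq (c : PySem.Dict (Int × Int) Int) (g : PySem.Dict Int (PySem.Set Int))
    (line : List (String × List (List Int))) : pvLineA c g line = pvLineB c g line := by
  by_cases h : (PySem.Dict.ofList line).getD "path" ([] : List (List Int)) = []
  · simp [pvLineA, pvLineB, h]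
  · rw [pvLineA_canon c g line h, pvLineB_canon c g line h]

-- ===== VERDICT (by name: the statement is the Claim_ definition above) =====
theorem build_transition_graph_from_map_data_spec : Claim_equal_build_transition_graph_from_map_data := by
  intro map_data cell_to_code _
  unfold Spec_build_transition_graph_from_map_data
  unfold build_transition_graph_from_map_data build_transition_graph_from_map_data_alt
  have h : pvLineA (pvCtc cell_to_code) = pvLineB (pvCtc cell_to_code) :=
    funext fun g => funext fun line => pvLine_eq _ g line
  simp only [h]
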